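-- pv_equiv track=rewrite | github.com/namitanair28/aug2020 | homeworks/HW6/dictionary_practice.py | sameKeys
-- ===== SOURCE A (Python) =====
-- def sameKeys(diction1, diction2):
--     newdict = {}
--     if diction1 == {} or diction2 == {}:
--         return newdict
--     for i in diction1.keys():
--         for j in diction2.keys():
--             if i == j:
--                 newlist = []
--                 newlist.append(diction1[i])
--                 newlist.append(diction2[i])
--                 newdict[i] = newlist
--     return newdict
-- ===== SOURCE B (Python) =====
-- def sameKeys(diction1, diction2):
--     return {k: [v, diction2[k]] for k, v in diction1.items() if k in diction2}
-- ===== Notes on version B (the rewrite author's own statement) =====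
-- stated objective: idiomatic
-- what changed: Replaces the nested all-pairs key scan and the mutating loop with a single-pass dict comprehension over diction1.items() guarded by an O(1) dict membership test, dropping the redundant empty-dict guard.
import Mathlib
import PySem

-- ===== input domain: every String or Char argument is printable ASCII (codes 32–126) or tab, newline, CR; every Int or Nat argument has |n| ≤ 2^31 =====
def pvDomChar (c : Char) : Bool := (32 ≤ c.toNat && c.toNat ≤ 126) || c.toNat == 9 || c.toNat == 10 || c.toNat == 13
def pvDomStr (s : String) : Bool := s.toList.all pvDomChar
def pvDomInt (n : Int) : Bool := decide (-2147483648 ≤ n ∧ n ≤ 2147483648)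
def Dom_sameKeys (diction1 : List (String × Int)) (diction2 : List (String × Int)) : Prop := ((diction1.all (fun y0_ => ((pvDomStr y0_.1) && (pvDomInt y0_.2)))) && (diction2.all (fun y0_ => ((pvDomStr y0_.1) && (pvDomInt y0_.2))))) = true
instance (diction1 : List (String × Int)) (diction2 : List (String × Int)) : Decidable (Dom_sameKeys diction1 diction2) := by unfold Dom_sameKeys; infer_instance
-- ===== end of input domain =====

-- B replaces A's nested all-pairs key scan by a single dict comprehension over
-- diction1.items() with a membership test in diction2 (idiomatic/faster); same return value.

-- ===== PORT A =====
-- A receives two dicts; the assoc-list arguments are read as dicts (insertion order,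
-- later duplicate keys overwrite), exactly as Python builds them.
def sameKeys (diction1 : List (String × Int)) (diction2 : List (String × Int)) : List (String × List Int) :=
  let d1 : PySem.Dict String Int := PySem.Dict.ofList diction1
  let d2 : PySem.Dict String Int := PySem.Dict.ofList diction2
  let newdict : PySem.Dict String (List Int) := PySem.Dict.empty
  if d1.items = [] ∨ d2.items = [] then newdict.items
  else
    (d1.keys.foldl (fun nd i =>
      d2.keys.foldl (fun nd j =>
        if i = j then
          -- newlist = []; newlist.append(diction1[i]); newlist.append(diction2[i])
          -- (the key is present, so dict lookup returns its value: getD's default is never used)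
          nd.insert i [d1.getD i 0, d2.getD i 0]
        else nd) nd) newdict).items

-- ===== PORT B =====
-- {k: [v, diction2[k]] for k, v in diction1.items() if k in diction2}
def sameKeys_alt (diction1 : List (String × Int)) (diction2 : List (String × Int)) : List (String × List Int) :=
  let d1 : PySem.Dict String Int := PySem.Dict.ofList diction1
  let d2 : PySem.Dict String Int := PySem.Dict.ofList diction2
  (PySem.Dict.ofList ((d1.items.filter (fun p => d2.contains p.1)).map
      (fun p => (p.1, [p.2, d2.getD p.1 0])))).items

-- ===== PRECONDITION & SPEC =====
def Spec_sameKeys (diction1 : List (String × Int)) (diction2 : List (String × Int)) (out : List (String × List Int)) : Prop := out = sameKeys_alt diction1 diction2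
instance (diction1 : List (String × Int)) (diction2 : List (String × Int)) (out : List (String × List Int)) : Decidable (Spec_sameKeys diction1 diction2 out) := by unfold Spec_sameKeys; infer_instance

-- ===== CLAIM (what is proved, stated in full; the proofs are below) =====
def Claim_equal_sameKeys : Prop := ∀ (diction1 : List (String × Int)) (diction2 : List (String × Int)), Dom_sameKeys diction1 diction2 → Spec_sameKeys diction1 diction2 (sameKeys diction1 diction2)

-- ===== LEMMAS AND PROOFS =====

-- A's inner loop over d2's keys inserts (i, val) exactly when i occurs among them.
theorem pv_inner_loop (l : List String) (i : String) (val : List Int)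
    (nd : PySem.Dict String (List Int)) :
    l.foldl (fun nd j => if i = j then nd.insert i val else nd) nd
      = if i ∈ l then nd.insert i val else nd := by
  induction l generalizing nd with
  | nil => simp
  | cons a l ih =>
    simp only [List.foldl_cons, List.mem_cons]
    by_cases hia : i = a
    · subst hia
      simp [ih, PySem.Dict.insert_insert_self]
    · simp [hia, ih]

-- A's outer loop over nodup fresh keys builds the dict whose items are the filtered keys paired with val.
theorem pv_outer_loop (l : List String) (p : String → Bool) (val : String → List Int)
    (d : PySem.Dict String (List Int)) (hnd : l.Nodup)
    (hfresh : ∀ k ∈ l, d.contains k = false) :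
    (l.foldl (fun nd i => if p i then nd.insert i (val i) else nd) d).items
      = d.items ++ (l.filter p).map (fun k => (k, val k)) := by
  induction l generalizing d with
  | nil => simp
  | cons a l ih =>
    simp only [List.foldl_cons, List.filter_cons]
    rcases List.nodup_cons.mp hnd with ⟨ha, hnd'⟩
    by_cases hpa : p a = true
    · rw [if_pos hpa, if_pos hpa, ih (d.insert a (val a)) hnd']
      · rw [PySem.Dict.items_insert, hfresh a (List.mem_cons_self ..)]
        simp
      · intro k hk
        rw [PySem.Dict.contains_insert]
        have : (k == a) = false := by
          simp only [beq_eq_false_iff_ne]; exact fun h => ha (h ▸ hk)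
        simp [this, hfresh k (List.mem_cons_of_mem _ hk)]
    · rw [if_neg hpa, if_neg hpa, ih d hnd' (fun k hk => hfresh k (List.mem_cons_of_mem _ hk))]

-- B's dict comprehension: the built dict's items are exactly the comprehension's list
-- (its keys are distinct and fresh).
theorem pv_ofList_items_of_nodup_keys (l : List (String × List Int))
    (h : (l.map Prod.fst).Nodup) :
    (PySem.Dict.ofList l).items = l := by
  have := PySem.Dict.items_foldl_insert_fresh (l := l) (k := Prod.fst) (v := Prod.snd)
    (d := PySem.Dict.empty) (by simp [PySem.Dict.contains_empty]) h
  simpa using this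

theorem sameKeys_eq (diction1 diction2 : List (String × Int)) :
    sameKeys diction1 diction2 = sameKeys_alt diction1 diction2 := by
  unfold sameKeys sameKeys_alt
  set d1 : PySem.Dict String Int := PySem.Dict.ofList diction1 with hd1
  set d2 : PySem.Dict String Int := PySem.Dict.ofList diction2 with hd2
  have hnd1 : d1.keys.Nodup := hd1 ▸ PySem.Dict.nodup_keys_ofList diction1
  have hnd2 : d2.keys.Nodup := hd2 ▸ PySem.Dict.nodup_keys_ofList diction2
  -- canonical form of B's result
  have hitems : d1.items = d1.keys.map (fun k => (k, d1.getD k 0)) :=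
    PySem.Dict.items_eq_map_keys d1 hnd1 0
  have hB : (PySem.Dict.ofList ((d1.items.filter (fun p => d2.contains p.1)).map
            (fun p => (p.1, [p.2, d2.getD p.1 0])))).items
      = (d1.keys.filter (fun k => d2.contains k)).map
          (fun k => (k, [d1.getD k 0, d2.getD k 0])) := by
    rw [hitems, List.filter_map, List.map_map]
    have hcomp : (d1.keys.filter
          ((fun p => d2.contains p.1) ∘ fun k => (k, d1.getD k 0))).map
          ((fun p => (p.1, [p.2, d2.getD p.1 0])) ∘ fun k => (k, d1.getD k 0))
        = (d1.keys.filter (fun k => d2.contains k)).map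
            (fun k => (k, [d1.getD k 0, d2.getD k 0])) := rfl
    rw [hcomp]
    apply pv_ofList_items_of_nodup_keys
    simp only [List.map_map]
    have hid : (Prod.fst ∘ fun k => ((k : String), [d1.getD k 0, d2.getD k 0])) = id := rfl
    rw [hid, List.map_id]
    exact hnd1.filter _
  by_cases hempty : d1.items = [] ∨ d2.items = []
  · rw [if_pos hempty, hB]
    rcases hempty with h | h
    · have : d1.keys = [] := by simp [PySem.Dict.keys, h]
      simp [this, PySem.Dict.empty]
    · have hk2 : d2.keys = [] := by simp [PySem.Dict.keys, h]
      have hc : ∀ k, d2.contains k = false := fun k => by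
        rw [PySem.Dict.contains_eq_decide_mem_keys, hk2]; simp
      rw [List.filter_eq_nil_iff.mpr (by intro k _; simp [hc k])]
      simp [PySem.Dict.empty]
  · rw [if_neg hempty, hB]
    -- A's nested loop
    have hstep : (fun (nd : PySem.Dict String (List Int)) (i : String) => d2.keys.foldl
          (fun nd j => if i = j then nd.insert i [d1.getD i 0, d2.getD i 0] else nd) nd)
        = (fun (nd : PySem.Dict String (List Int)) (i : String) => if (decide (i ∈ d2.keys) : Bool) then
              nd.insert i [d1.getD i 0, d2.getD i 0] else nd) := by
      funext (nd : PySem.Dict String (List Int)) (i : String)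
      rw [pv_inner_loop]
      by_cases h : i ∈ d2.keys <;> simp [h]
    rw [hstep, pv_outer_loop d1.keys _ _ PySem.Dict.empty hnd1
      (fun k _ => PySem.Dict.contains_empty k)]
    have : d1.keys.filter (fun i => decide (i ∈ d2.keys))
        = d1.keys.filter (fun k => d2.contains k) := by
      apply List.filter_congr
      intro k _
      rw [PySem.Dict.contains_eq_decide_mem_keys]
    rw [this]
    simp [PySem.Dict.empty]

-- ===== VERDICT (by name: the statement is the Claim_ definition above) =====
theorem sameKeys_spec : Claim_equal_sameKeys := by
  intro diction1 diction2 _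
  unfold Spec_sameKeys
  exact sameKeys_eq diction1 diction2
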